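-- pv_equiv track=rewrite | github.com/thiagolrpinho/vert_face_recognitor | text_OCR_detection_helper.py | retirando_chars_especiais
-- ===== SOURCE A (Python) =====
-- def retirando_chars_especiais(text_final, index_regiao):
--     if index_regiao == 0:
--         ### Caso text_final tenha 2 posições ou mais
--         if (len(text_final) >= 2):
--             ## Retirar a primeira que costuma ser ruido
--             text_final.pop(0)
--     elif index_regiao == 1:
--         ### Caso text_final tenha 2 posições ou mais
--         if (len(text_final) >= 2):
--             ## Costuma ter ruido a partir da segunda posicao da lista
--             text_final = [text_final[0]]
--     elif index_regiao == 4: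
--         ### Caso text_final tenha 2 posições ou menos
--         if (len(text_final[0]) <= 2):
--             ## Retirar a primeira que costuma ser ruido
--             text_final.pop(0)
--     elif ((index_regiao == 2) or (index_regiao == 3) or (index_regiao >= 5)):
--         if (len(text_final) >= 2):
--             ### Organizar para as maiores strings ficarem por ultimo, assim e so pegar ela
--             temp = list(zip(text_final, [len(x) for x in text_final]))
--             temp.sort(key = lambda tup: tup[1])
--             text_final = [temp[len(temp)-1][0]]
--         ### Dando replace em alguns casos necessarios
--         text_final = [text_final[0].replace("S", "5")]
--         text_final = [text_final[0].replace(" ", "")]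
--     return text_final
-- ===== SOURCE B (Python) =====
-- def retirando_chars_especiais(text_final, index_regiao):
--     if index_regiao == 2 or index_regiao == 3 or index_regiao >= 5:
--         # single pass: last string of maximal length (>= so ties pick the last,
--         # like the stable sort + take-last in the original)
--         best = text_final[0]
--         for s in text_final[1:]:
--             if len(s) >= len(best):
--                 best = s
--         return [best.replace("S", "5").replace(" ", "")]
--     if index_regiao == 0:
--         if len(text_final) >= 2:
--             text_final.pop(0)
--     elif index_regiao == 1:
--         if len(text_final) >= 2:
--             return text_final[:1]
--     elif index_regiao == 4:
--         if len(text_final[0]) <= 2: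
--             text_final.pop(0)
--     return text_final
-- ===== Notes on version B (the rewrite author's own statement) =====
-- stated objective: faster
-- what changed: In the {2,3,>=5} branch, B replaces building a zip(string,len) list, stable-sorting it by length and taking the last tuple with a single left-to-right scan that keeps the last string of maximal length (update on >=); the other branches keep A's behaviour (including the pop(0) mutation).
import Mathlib
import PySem

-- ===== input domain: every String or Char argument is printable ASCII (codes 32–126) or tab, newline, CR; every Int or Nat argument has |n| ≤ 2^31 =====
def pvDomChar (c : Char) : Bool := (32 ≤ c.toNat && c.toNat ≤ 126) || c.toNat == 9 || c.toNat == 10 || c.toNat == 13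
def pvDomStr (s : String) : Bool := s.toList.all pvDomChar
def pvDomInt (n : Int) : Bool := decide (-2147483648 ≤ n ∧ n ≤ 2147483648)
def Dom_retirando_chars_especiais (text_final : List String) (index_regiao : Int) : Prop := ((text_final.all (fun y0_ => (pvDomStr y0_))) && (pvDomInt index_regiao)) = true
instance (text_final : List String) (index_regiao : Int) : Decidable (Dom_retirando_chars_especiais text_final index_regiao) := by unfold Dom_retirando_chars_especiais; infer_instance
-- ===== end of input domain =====

-- B replaces the zip/stable-sort/take-last selection of the longest string with a single
-- left-to-right max scan (update on >=, so ties pick the last maximal string, as the stable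
-- sort does).  Python A mutates text_final via pop(0) in the 0/4 branches; Python B performs
-- the same mutation, and the Lean theorems are about the return value.

-- ===== PORT A =====
def retirando_chars_especiais (text_final : List String) (index_regiao : Int) : List String :=
  if index_regiao = 0 then
    if 2 ≤ text_final.length then
      match PySem.List.pop? text_final 0 with
      | some (_, rest) => rest
      | none => text_final
    else text_final
  else if index_regiao = 1 then
    if 2 ≤ text_final.length then [PySem.List.pyGetD text_final 0 ""] else text_final
  else if index_regiao = 4 then
    if PySem.Str.len (PySem.List.pyGetD text_final 0 "") ≤ 2 then
      match PySem.List.pop? text_final 0 with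
      | some (_, rest) => rest
      | none => text_final
    else text_final
  else if index_regiao = 2 ∨ index_regiao = 3 ∨ 5 ≤ index_regiao then
    let tf1 :=
      if 2 ≤ text_final.length then
        let temp := PySem.List.sorted
          (text_final.zip (text_final.map (fun x => PySem.Str.len x)))
          (fun tup => tup.2)
        [(PySem.List.pyGetD temp (PySem.List.len temp - 1) ("", 0)).1]
      else text_final
    let tf2 := [PySem.Str.replace (PySem.List.pyGetD tf1 0 "") "S" "5"]
    [PySem.Str.replace (PySem.List.pyGetD tf2 0 "") " " ""]
  else text_final

-- ===== PORT B =====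
def retirando_chars_especiais_alt (text_final : List String) (index_regiao : Int) : List String :=
  if index_regiao = 2 ∨ index_regiao = 3 ∨ 5 ≤ index_regiao then
    let best := (PySem.List.slice text_final (some 1) none).foldl
      (fun b s => if PySem.Str.len b ≤ PySem.Str.len s then s else b)
      (PySem.List.pyGetD text_final 0 "")
    [PySem.Str.replace (PySem.Str.replace best "S" "5") " " ""]
  else if index_regiao = 0 then
    if 2 ≤ text_final.length then
      match PySem.List.pop? text_final 0 with
      | some (_, rest) => rest
      | none => text_final
    else text_final
  else if index_regiao = 1 then
    if 2 ≤ text_final.length then PySem.List.slice text_final none (some 1) else text_final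
  else if index_regiao = 4 then
    if PySem.Str.len (PySem.List.pyGetD text_final 0 "") ≤ 2 then
      match PySem.List.pop? text_final 0 with
      | some (_, rest) => rest
      | none => text_final
    else text_final
  else text_final

-- ===== PRECONDITION & SPEC =====
-- Pre_ excludes exactly the inputs where Python A raises IndexError at text_final[0]:
-- an empty list with index_regiao in {2, 3, 4} or >= 5.
def Pre_retirando_chars_especiais (text_final : List String) (index_regiao : Int) : Prop :=
  (index_regiao = 2 ∨ index_regiao = 3 ∨ index_regiao = 4 ∨ 5 ≤ index_regiao) → text_final ≠ []
instance (text_final : List String) (index_regiao : Int) : Decidable (Pre_retirando_chars_especiais text_final index_regiao) := by unfold Pre_retirando_chars_especiais; infer_instance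

def pvWitness_retirando_chars_especiais : List String × Int := (["a S", "bS cd"], 2)

def Spec_retirando_chars_especiais (text_final : List String) (index_regiao : Int) (out : List String) : Prop := out = retirando_chars_especiais_alt text_final index_regiao
instance (text_final : List String) (index_regiao : Int) (out : List String) : Decidable (Spec_retirando_chars_especiais text_final index_regiao out) := by unfold Spec_retirando_chars_especiais; infer_instance

-- ===== CLAIM (what is proved, stated in full; the proofs are below) =====
def Claim_equal_retirando_chars_especiais : Prop := ∀ (text_final : List String) (index_regiao : Int), Dom_retirando_chars_especiais text_final index_regiao → Pre_retirando_chars_especiais text_final index_regiao → Spec_retirando_chars_especiais text_final index_regiao (retirando_chars_especiais text_final index_regiao)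

-- ===== LEMMAS AND PROOFS =====

-- last element of insertBy into a key-sorted nonempty list = the >=-scan step
theorem pv_getLast?_insertBy {α : Type} (k : α → Int) (y : α) :
    ∀ (S : List α), S.Pairwise (fun a b => k a ≤ k b) → ∀ (h : S ≠ []),
      (PySem.List.insertBy (fun a b => decide (k a < k b)) y S).getLast? =
        some (if k (S.getLast h) ≤ k y then y else S.getLast h) := by
  intro S
  induction S with
  | nil => intro _ h; exact absurd rfl h
  | cons z zs ih =>
    intro hp h
    have hz : ∀ w ∈ zs, k z ≤ k w := (List.pairwise_cons.mp hp).1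
    have hp' : zs.Pairwise (fun a b => k a ≤ k b) := (List.pairwise_cons.mp hp).2
    by_cases hlt : k y < k z
    · simp only [PySem.List.insertBy, hlt, decide_true, if_true]
      cases zs with
      | nil => simp [List.getLast?_cons_cons]; omega
      | cons w ws =>
        have hmem : (w :: ws).getLast (by simp) ∈ w :: ws := List.getLast_mem _
        have hle : k z ≤ k ((w :: ws).getLast (by simp)) := hz _ hmem
        have hgl : (z :: w :: ws).getLast h = (w :: ws).getLast (by simp) :=
          List.getLast_cons (by simp)
        rw [List.getLast?_cons_cons, List.getLast?_cons_cons,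
          List.getLast?_eq_some_getLast (l := w :: ws) (by simp), hgl]
        rw [if_neg (by omega)]
    · simp only [PySem.List.insertBy, hlt, decide_false, Bool.false_eq_true, if_false]
      cases zs with
      | nil =>
        simp only [PySem.List.insertBy, List.getLast?_cons_cons]
        simp [List.getLast?_eq_some_getLast]
        omega
      | cons w ws =>
        cases hI : PySem.List.insertBy (fun a b => decide (k a < k b)) y (w :: ws) with
        | nil =>
          have : y ∈ PySem.List.insertBy (fun a b => decide (k a < k b)) y (w :: ws) :=
            (PySem.List.mem_insertBy _ _ _ _).mpr (Or.inl rfl)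
          simp [hI] at this
        | cons a t =>
          have hstep := ih hp' (by simp)
          rw [hI] at hstep
          rw [List.getLast?_cons_cons, hstep]
          have hgl : (z :: w :: ws).getLast h = (w :: ws).getLast (by simp) :=
            List.getLast_cons (by simp)
          rw [hgl]

-- sorted of a snoc = insertBy into sorted
theorem pv_sorted_concat {α : Type} (k : α → Int) (l : List α) (y : α) :
    PySem.List.sorted (l ++ [y]) k =
      PySem.List.insertBy (fun a b => decide (k a < k b)) y (PySem.List.sorted l k) := by
  rw [PySem.List.sorted_eq_foldl_insertBy, PySem.List.sorted_eq_foldl_insertBy,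
    List.foldl_append]
  rfl

-- last element of the stable sort of a nonempty list = left-to-right >=-max scan
theorem pv_getLast?_sorted {α : Type} (k : α → Int) (b : α) (xs : List α) :
    (PySem.List.sorted (b :: xs) k).getLast? =
      some (xs.foldl (fun b s => if k b ≤ k s then s else b) b) := by
  induction xs using List.reverseRecOn with
  | nil =>
    rw [PySem.List.sorted_eq_foldl_insertBy]
    rfl
  | append_singleton xs y ih =>
    have hcons : b :: (xs ++ [y]) = (b :: xs) ++ [y] := by simp
    rw [hcons, pv_sorted_concat]
    have hne : PySem.List.sorted (b :: xs) k ≠ [] := by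
      rw [Ne, PySem.List.sorted_eq_nil_iff]; simp
    have hpw : (PySem.List.sorted (b :: xs) k).Pairwise (fun a b => k a ≤ k b) :=
      PySem.List.sorted_pairwise _ _
    rw [pv_getLast?_insertBy k y _ hpw hne]
    have hlast : (PySem.List.sorted (b :: xs) k).getLast hne =
        xs.foldl (fun b s => if k b ≤ k s then s else b) b := by
      rw [List.getLast?_eq_some_getLast hne] at ih
      exact Option.some.inj ih
    rw [hlast, List.foldl_append]
    simp only [List.foldl_cons, List.foldl_nil]

-- zipping a list with its mapped lengths is mapping to pairs
theorem pv_zip_map_self {α β : Type} (f : α → β) (xs : List α) :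
    xs.zip (xs.map f) = xs.map (fun s => (s, f s)) := by
  induction xs with
  | nil => rfl
  | cons x xs ih => simp only [List.map_cons, List.zip_cons_cons, ih]

-- the pair scan keyed by .2 computes the string scan keyed by length
theorem pv_foldl_pair (xs : List String) : ∀ (b : String),
    (xs.map (fun s => (s, PySem.Str.len s))).foldl
        (fun p q => if p.2 ≤ q.2 then q else p) (b, PySem.Str.len b)
      = ((xs.foldl (fun b s => if PySem.Str.len b ≤ PySem.Str.len s then s else b) b),
         PySem.Str.len (xs.foldl (fun b s => if PySem.Str.len b ≤ PySem.Str.len s then s else b) b)) := by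
  induction xs with
  | nil => intro b; rfl
  | cons x xs ih =>
    intro b
    simp only [List.map_cons, List.foldl_cons]
    by_cases hc : PySem.Str.len b ≤ PySem.Str.len x
    · rw [if_pos hc, if_pos hc, ih]
    · rw [if_neg hc, if_neg hc, ih]

-- the {2,3,>=5} branch of A equals B's scan on a nonempty list
theorem pv_sort_branch (x : String) (xs : List String) :
    (let tf1 :=
        if 2 ≤ (x :: xs).length then
          let temp := PySem.List.sorted
            ((x :: xs).zip ((x :: xs).map (fun s => PySem.Str.len s)))
            (fun tup => tup.2)
          [(PySem.List.pyGetD temp (PySem.List.len temp - 1) ("", 0)).1]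
        else (x :: xs)
      let tf2 := [PySem.Str.replace (PySem.List.pyGetD tf1 0 "") "S" "5"]
      [PySem.Str.replace (PySem.List.pyGetD tf2 0 "") " " ""])
    = [PySem.Str.replace
        (PySem.Str.replace
          (xs.foldl (fun b s => if PySem.Str.len b ≤ PySem.Str.len s then s else b) x)
          "S" "5") " " ""] := by
  by_cases hlen : 2 ≤ (x :: xs).length
  · simp only [hlen, if_true]
    rw [pv_zip_map_self]
    set temp := PySem.List.sorted ((x :: xs).map (fun s => (s, PySem.Str.len s)))
      (fun tup => tup.2) with htemp
    have hne : temp ≠ [] := by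
      rw [htemp, Ne, PySem.List.sorted_eq_nil_iff]; simp
    have hlast? : temp.getLast? =
        some ((xs.foldl (fun b s => if PySem.Str.len b ≤ PySem.Str.len s then s else b) x),
              PySem.Str.len (xs.foldl (fun b s => if PySem.Str.len b ≤ PySem.Str.len s then s else b) x)) := by
      rw [htemp, List.map_cons, pv_getLast?_sorted, pv_foldl_pair]
    have hget : PySem.List.pyGetD temp (PySem.List.len temp - 1) ("", 0) = temp.getLast hne := by
      have h1 : 1 ≤ temp.length := by
        cases htl : temp with
        | nil => exact absurd htl hne
        | cons a t => simp
      have hi : PySem.List.len temp - 1 = ((temp.length - 1 : Nat) : Int) := by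
        rw [PySem.List.len_eq]; omega
      rw [hi, PySem.List.pyGetD_natCast, List.getD_eq_getElem _ _ (by omega),
        List.getLast_eq_getElem]
    have hval : PySem.List.pyGetD temp (PySem.List.len temp - 1) ("", 0) =
        ((xs.foldl (fun b s => if PySem.Str.len b ≤ PySem.Str.len s then s else b) x),
         PySem.Str.len (xs.foldl (fun b s => if PySem.Str.len b ≤ PySem.Str.len s then s else b) x)) := by
      rw [hget]
      rw [List.getLast?_eq_some_getLast hne] at hlast?
      exact Option.some.inj hlast?
    rw [hval]
    simp [PySem.List.pyGetD_zero_cons]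
  · have h1 : xs = [] := by
      cases xs with
      | nil => rfl
      | cons a t => simp at hlen
    subst h1
    simp [PySem.List.pyGetD_zero_cons]

-- ===== VERDICT (by name: the statement is the Claim_ definition above) =====
theorem retirando_chars_especiais_spec : Claim_equal_retirando_chars_especiais := by
  intro tf idx _hDom hPre
  unfold Spec_retirando_chars_especiais retirando_chars_especiais retirando_chars_especiais_alt
  by_cases h2 : idx = 2 ∨ idx = 3 ∨ 5 ≤ idx
  · have h0 : ¬ idx = 0 := by omega
    have h1 : ¬ idx = 1 := by omega
    have h4 : ¬ idx = 4 := by omega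
    have hne : tf ≠ [] := hPre (by omega)
    cases tf with
    | nil => exact absurd rfl hne
    | cons x xs =>
      rw [if_neg h0, if_neg h1, if_neg h4, if_pos h2, if_pos h2]
      rw [PySem.List.slice_from_one, List.tail_cons, PySem.List.pyGetD_zero_cons]
      exact pv_sort_branch x xs
  · simp only [if_neg h2]
    by_cases hq : idx = 1
    · have h0 : ¬ idx = 0 := by omega
      simp only [if_neg h0, if_pos hq]
      by_cases hl : 2 ≤ tf.length
      · simp only [if_pos hl]
        cases tf with
        | nil => simp at hl
        | cons x xs =>
          rw [PySem.List.pyGetD_zero_cons, PySem.List.slice_to _ (by norm_num)]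
          simp
      · simp only [if_neg hl]
    · simp only [if_neg hq]
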